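-- pv_equiv track=rewrite | github.com/wlgns522/Algorithm24-1 | 6장/counting_sort_alphabet_case.py | counting_sort_alphabet_case
-- ===== SOURCE A (Python) =====
-- def counting_sort_alphabet_case(arr):
--     count = [0] * 52
--     output = [''] * len(arr)
--
--     for char in arr:
--         if 'a' <= char <= 'z':
--             count[ord(char) - ord('a')] += 1
--         elif 'A' <= char <= 'Z':
--             count[ord(char) - ord('A') + 26] += 1
--
--     for i in range(1, 52):
--         count[i] += count[i - 1]
--
--     for char in reversed(arr):
--         if 'a' <= char <= 'z':
--             output[count[ord(char) - ord('a')] - 1] = char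
--             count[ord(char) - ord('a')] -= 1
--         elif 'A' <= char <= 'Z':
--             output[count[ord(char) - ord('A') + 26] - 1] = char
--             count[ord(char) - ord('A') + 26] -= 1
--
--     return ''.join(output)
-- ===== SOURCE B (Python) =====
-- def counting_sort_alphabet_case(arr):
--     letters = [c for c in arr if ('a' <= c <= 'z') or ('A' <= c <= 'Z')]
--     rank = lambda c: ord(c) - ord('a') if 'a' <= c <= 'z' else ord(c) - ord('A') + 26
--     return ''.join(sorted(letters, key=rank))
-- ===== Notes on version B (the rewrite author's own statement) =====
-- stated objective: simpler
-- what changed: Replaces the three-pass counting machinery (52-slot count array, prefix sums, reverse placement into a preallocated output array) with a single filter of the letters followed by one stable comparison sort under a lowercase-before-uppercase rank key.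
import Mathlib
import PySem

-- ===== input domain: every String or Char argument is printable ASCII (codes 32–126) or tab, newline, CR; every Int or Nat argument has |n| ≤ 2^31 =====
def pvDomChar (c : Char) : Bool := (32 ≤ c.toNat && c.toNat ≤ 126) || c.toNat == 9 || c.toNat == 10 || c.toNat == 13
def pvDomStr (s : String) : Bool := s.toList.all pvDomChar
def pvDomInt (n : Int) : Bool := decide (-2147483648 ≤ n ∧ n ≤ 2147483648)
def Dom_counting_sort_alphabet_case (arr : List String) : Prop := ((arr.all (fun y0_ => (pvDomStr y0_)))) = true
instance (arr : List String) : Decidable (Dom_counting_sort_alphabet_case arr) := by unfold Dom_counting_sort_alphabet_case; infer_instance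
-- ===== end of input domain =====

-- B replaces A's three-pass counting sort (count array, prefix sums, reverse placement)
-- by a filter of the letters followed by one stable comparison sort under a rank key: simpler.


-- shared primitives: Python's lexicographic `<=` on strings, written out on code points (exact), and ord()
def pyCharsLe : List Char → List Char → Bool
  | [], _ => true
  | _ :: _, [] => false
  | a :: x, b :: y => if a < b then true else if b < a then false else pyCharsLe x y

def pyStrLe (a b : String) : Bool := pyCharsLe a.toList b.toList

-- ord(s); exact for one-character strings (Python raises TypeError otherwise; Pre_ excludes those calls)
def pvOrd (s : String) : Int := ((s.toList.headD ' ').toNat : Int)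

-- 'a' <= ch <= 'z'  /  'A' <= ch <= 'Z' (the two tests both programs perform)
def pvIsLow (s : String) : Bool := pyStrLe "a" s && pyStrLe s "z"
def pvIsUp (s : String) : Bool := pyStrLe "A" s && pyStrLe s "Z"

-- ===== PORT A =====
-- the three loop bodies of A; indices are nonnegative and in range under Pre_, so .toNat is exact there
def csacStep1 (count : List Int) (ch : String) : List Int :=
  if pvIsLow ch then
    count.set (pvOrd ch - 97).toNat (count.getD (pvOrd ch - 97).toNat 0 + 1)
  else if pvIsUp ch then
    count.set (pvOrd ch - 65 + 26).toNat (count.getD (pvOrd ch - 65 + 26).toNat 0 + 1)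
  else count

def csacStep2 (count : List Int) (i : Int) : List Int :=
  count.set i.toNat (count.getD i.toNat 0 + count.getD (i - 1).toNat 0)

def csacStep3 (st : List Int × List String) (ch : String) : List Int × List String :=
  if pvIsLow ch then
    (st.1.set (pvOrd ch - 97).toNat (st.1.getD (pvOrd ch - 97).toNat 0 - 1),
     st.2.set (st.1.getD (pvOrd ch - 97).toNat 0 - 1).toNat ch)
  else if pvIsUp ch then
    (st.1.set (pvOrd ch - 65 + 26).toNat (st.1.getD (pvOrd ch - 65 + 26).toNat 0 - 1),
     st.2.set (st.1.getD (pvOrd ch - 65 + 26).toNat 0 - 1).toNat ch)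
  else st

def counting_sort_alphabet_case (arr : List String) : String :=
  let count0 : List Int := List.replicate 52 0
  let output0 : List String := List.replicate arr.length ""
  let count1 := arr.foldl csacStep1 count0
  let count2 := (PySem.List.pyRange 1 52 1).foldl csacStep2 count1
  let res := arr.reverse.foldl csacStep3 (count2, output0)
  PySem.Str.join "" res.2

-- ===== PORT B =====
-- B's sort key: rank = ord(c)-ord('a') if lowercase else ord(c)-ord('A')+26
def csacRank (c : String) : Int := if pvIsLow c then pvOrd c - 97 else pvOrd c - 65 + 26

def counting_sort_alphabet_case_alt (arr : List String) : String :=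
  let letters := arr.filter (fun c => pvIsLow c || pvIsUp c)
  PySem.Str.join "" (PySem.List.sorted letters csacRank false)

-- ===== PRECONDITION & SPEC =====
-- Pre_ excludes lists containing a multi-character string that compares inside a letter range
-- (e.g. "hello", "Az"): there Python's ord() raises TypeError in A (and in B's key), so A returns nothing.
def Pre_counting_sort_alphabet_case (arr : List String) : Prop :=
  ∀ s ∈ arr, (pvIsLow s || pvIsUp s) = true → s.toList.length = 1

instance (arr : List String) : Decidable (Pre_counting_sort_alphabet_case arr) := by
  unfold Pre_counting_sort_alphabet_case; infer_instance

def pvWitness_counting_sort_alphabet_case : List String := ["b", "A", "z", "!", "a", "Z", "", "+5"]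

def Spec_counting_sort_alphabet_case (arr : List String) (out : String) : Prop := out = counting_sort_alphabet_case_alt arr
instance (arr : List String) (out : String) : Decidable (Spec_counting_sort_alphabet_case arr out) := by unfold Spec_counting_sort_alphabet_case; infer_instance

-- ===== CLAIM (what is proved, stated in full; the proofs are below) =====
def Claim_equal_counting_sort_alphabet_case : Prop := ∀ (arr : List String), Dom_counting_sort_alphabet_case arr → Pre_counting_sort_alphabet_case arr → Spec_counting_sort_alphabet_case arr (counting_sort_alphabet_case arr)

-- ===== LEMMAS AND PROOFS =====

-- letter index 0..51 (lowercase first), the letter string of an index, counts and partial sums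
def lidx (s : String) : Nat :=
  if pvIsLow s then (pvOrd s - 97).toNat else (pvOrd s - 65 + 26).toNat

def lstr (j : Nat) : String :=
  String.ofList [if j < 26 then Char.ofNat (97 + j) else Char.ofNat (65 + (j - 26))]

def pvIsLet (s : String) : Bool := pvIsLow s || pvIsUp s

def mj (lst : List String) (j : Nat) : Nat :=
  lst.countP (fun s => pvIsLet s && lidx s == j)

def bse (lst : List String) (j : Nat) : Nat := ∑ i ∈ Finset.range j, mj lst i

def Good (lst : List String) : Prop := ∀ s ∈ lst, pvIsLet s = true → s.toList.length = 1

def canonN (lst : List String) (n : Nat) : List String :=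
  (List.range n).flatMap (fun j => List.replicate (mj lst j) (lstr j))

def canon (lst : List String) : List String := canonN lst 52

def pick (m b : Nat → Nat) (p : Nat) : Option Nat :=
  (List.range 52).find? (fun j => decide (b j ≤ p) && decide (p < b j + m j))

-- ---- small generic helpers ----
theorem charLe_iff (c d : Char) : c ≤ d ↔ c.toNat ≤ d.toNat := by
  rw [Char.le_def, UInt32.le_iff_toNat_le]; exact Iff.rfl

theorem pyCharsLe_single (c d : Char) : pyCharsLe [c] [d] = decide (c ≤ d) := by
  simp only [pyCharsLe]
  rcases lt_trichotomy c d with h | h | h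
  · simp [h, le_of_lt h]
  · simp [h]
  · simp [not_lt.mpr (le_of_lt h), h, not_le.mpr h]

theorem getD_set {α : Type} (l : List α) (i j : Nat) (v d : α) :
    (l.set i v).getD j d = if i = j ∧ i < l.length then v else l.getD j d := by
  by_cases hij : i = j
  · subst hij
    by_cases hi : i < l.length
    · simp [List.getD_eq_getElem?_getD, List.getElem?_set, hi]
    · simp [List.getD_eq_getElem?_getD, List.getElem?_set, hi]
  · simp [List.getD_eq_getElem?_getD, List.getElem?_set, hij]

theorem length_foldl_inv {α β : Type} (f : List α → β → List α) (l : List β) (s : List α)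
    (h : ∀ st x, (f st x).length = st.length) : (l.foldl f s).length = s.length := by
  induction l generalizing s with
  | nil => rfl
  | cons a t ih => simp [List.foldl_cons, ih, h]

theorem find?_congr' {α : Type} (l : List α) (P Q : α → Bool) (h : ∀ x ∈ l, P x = Q x) :
    l.find? P = l.find? Q := by
  induction l with
  | nil => rfl
  | cons a t ih =>
      simp only [List.find?_cons]
      rw [h a (by simp)]
      cases Q a
      · exact ih (fun x hx => h x (by simp [hx]))
      · rfl

theorem find?_eq_some_of_unique {α : Type} (l : List α) (P : α → Bool) (j : α)
    (hmem : j ∈ l) (hP : P j = true) (huniq : ∀ x ∈ l, P x = true → x = j) :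
    l.find? P = some j := by
  induction l with
  | nil => cases hmem
  | cons a t ih =>
      by_cases ha : P a = true
      · have haj : a = j := huniq a (by simp) ha
        subst haj
        simp [List.find?_cons, ha]
      · have haj : a ≠ j := fun h => ha (h ▸ hP)
        have hmem' : j ∈ t := by
          cases hmem with
          | head => exact absurd rfl haj
          | tail _ h => exact h
        simp only [List.find?_cons]
        rw [Bool.eq_false_iff.mpr ha]
        exact ih hmem' (fun x hx hPx => huniq x (by simp [hx]) hPx)

-- ---- character-level facts ----
theorem pvOrd_single (s : String) (c : Char) (h : s.toList = [c]) : pvOrd s = (c.toNat : Int) := by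
  simp [pvOrd, h]

theorem pvIsLow_single (s : String) (c : Char) (h : s.toList = [c]) :
    pvIsLow s = (decide (97 ≤ c.toNat) && decide (c.toNat ≤ 122)) := by
  have ha : "a".toList = ['a'] := by decide
  have hz : "z".toList = ['z'] := by decide
  simp only [pvIsLow, pyStrLe, h, ha, hz, pyCharsLe_single]
  have h1 : ('a' ≤ c) ↔ 97 ≤ c.toNat := by rw [charLe_iff]; exact Iff.rfl
  have h2 : (c ≤ 'z') ↔ c.toNat ≤ 122 := by rw [charLe_iff]; exact Iff.rfl
  simp [h1, h2]

theorem pvIsUp_single (s : String) (c : Char) (h : s.toList = [c]) :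
    pvIsUp s = (decide (65 ≤ c.toNat) && decide (c.toNat ≤ 90)) := by
  have ha : "A".toList = ['A'] := by decide
  have hz : "Z".toList = ['Z'] := by decide
  simp only [pvIsUp, pyStrLe, h, ha, hz, pyCharsLe_single]
  have h1 : ('A' ≤ c) ↔ 65 ≤ c.toNat := by rw [charLe_iff]; exact Iff.rfl
  have h2 : (c ≤ 'Z') ↔ c.toNat ≤ 90 := by rw [charLe_iff]; exact Iff.rfl
  simp [h1, h2]

theorem good_facts (s : String) (hlen : s.toList.length = 1) (hlet : pvIsLet s = true) :
    lidx s < 52 ∧ s = lstr (lidx s) ∧ csacRank s = (lidx s : Int) := by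
  obtain ⟨c, hc⟩ := List.length_eq_one_iff.mp hlen
  have hord := pvOrd_single s c hc
  have hs : s = String.ofList [c] := by rw [← hc, String.ofList_toList]
  cases hl : pvIsLow s with
  | true =>
      have hr : 97 ≤ c.toNat ∧ c.toNat ≤ 122 := by
        have := pvIsLow_single s c hc; rw [hl] at this
        constructor <;> [exact of_decide_eq_true (Bool.and_elim_left this.symm);
          exact of_decide_eq_true (Bool.and_elim_right this.symm)]
      have hi : lidx s = c.toNat - 97 := by simp only [lidx, hl, if_pos, hord]; omega
      have hj : lidx s < 52 := by omega
      refine ⟨hj, ?_, ?_⟩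
      · have hlt : lidx s < 26 := by omega
        have : Char.ofNat (97 + (c.toNat - 97)) = c := by
          have h97 : 97 + (c.toNat - 97) = c.toNat := by omega
          rw [h97, Char.ofNat_toNat]
        simp only [lstr, hi, if_pos (show c.toNat - 97 < 26 by omega), this]
        exact hs
      · simp only [csacRank, hl, if_pos, hord, hi]; omega
  | false =>
      have hu : pvIsUp s = true := by
        have := hlet; simp only [pvIsLet, hl, Bool.false_or] at this; exact this
      have hr : 65 ≤ c.toNat ∧ c.toNat ≤ 90 := by
        have := pvIsUp_single s c hc; rw [hu] at this
        constructor <;> [exact of_decide_eq_true (Bool.and_elim_left this.symm);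
          exact of_decide_eq_true (Bool.and_elim_right this.symm)]
      have hi : lidx s = c.toNat - 39 := by simp only [lidx, hl, Bool.false_eq_true, if_false, hord]; omega
      have hj : lidx s < 52 := by omega
      refine ⟨hj, ?_, ?_⟩
      · have hge : ¬ lidx s < 26 := by omega
        have : Char.ofNat (65 + (lidx s - 26)) = c := by
          have h65 : 65 + (lidx s - 26) = c.toNat := by omega
          rw [h65, Char.ofNat_toNat]
        simp only [lstr, if_neg hge, this]
        exact hs
      · simp only [csacRank, hl, Bool.false_eq_true, if_false, hord, hi]; omega

theorem lstr_facts (j : Nat) (hj : j < 52) :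
    pvIsLet (lstr j) = true ∧ (lstr j).toList.length = 1 ∧ lidx (lstr j) = j := by
  by_cases h26 : j < 26
  · have hc : (lstr j).toList = [Char.ofNat (97 + j)] := by
      simp only [lstr, if_pos h26]; rw [String.toList_ofList]
    have hv : (97 + j).isValidChar := Or.inl (by omega)
    have ht : (Char.ofNat (97 + j)).toNat = 97 + j := by
      unfold Char.ofNat
      split
      · simp [Char.toNat, Char.ofNatAux]; omega
      · rename_i hv'; exact absurd hv hv'
    have hlow : pvIsLow (lstr j) = true := by
      rw [pvIsLow_single _ _ hc, ht]; simp; omega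
    have hordl := pvOrd_single _ _ hc
    refine ⟨by simp [pvIsLet, hlow], by simp [hc], ?_⟩
    simp only [lidx, hlow, if_pos, hordl, ht]; omega
  · have hc : (lstr j).toList = [Char.ofNat (65 + (j - 26))] := by
      simp only [lstr, if_neg h26]; rw [String.toList_ofList]
    have hv : (65 + (j - 26)).isValidChar := Or.inl (by omega)
    have ht : (Char.ofNat (65 + (j - 26))).toNat = 65 + (j - 26) := by
      unfold Char.ofNat
      split
      · simp [Char.toNat, Char.ofNatAux]; omega
      · rename_i hv'; exact absurd hv hv'
    have hlow : pvIsLow (lstr j) = false := by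
      rw [pvIsLow_single _ _ hc, ht]; simp; omega
    have hup : pvIsUp (lstr j) = true := by
      rw [pvIsUp_single _ _ hc, ht]; simp; omega
    have hordl := pvOrd_single _ _ hc
    refine ⟨by simp [pvIsLet, hup], by simp [hc], ?_⟩
    simp only [lidx, hlow, Bool.false_eq_true, if_false, hordl, ht]; omega

-- ---- counting facts ----
theorem mj_cons (a : String) (lst : List String) (j : Nat) :
    mj (a :: lst) j = mj lst j + (if pvIsLet a = true ∧ lidx a = j then 1 else 0) := by
  simp only [mj, List.countP_cons]
  by_cases h : pvIsLet a = true ∧ lidx a = j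
  · simp [h.1, h.2]
  · rcases Decidable.not_and_iff_not_or_not.mp h with h' | h' <;> simp [h, h']

theorem bse_succ (lst : List String) (j : Nat) : bse lst (j + 1) = bse lst j + mj lst j := by
  simp [bse, Finset.sum_range_succ]

theorem bse_mono (lst : List String) {i j : Nat} (h : i ≤ j) : bse lst i ≤ bse lst j := by
  exact Finset.sum_le_sum_of_subset (fun x hx => Finset.mem_range.mpr (lt_of_lt_of_le (Finset.mem_range.mp hx) h))

theorem bse52_eq (lst : List String) (hG : Good lst) :
    bse lst 52 = (lst.filter pvIsLet).length := by
  induction lst with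
  | nil => simp [bse, mj]
  | cons a l ih =>
      have hGl : Good l := fun s hs => hG s (List.mem_cons_of_mem _ hs)
      have hsum : bse (a :: l) 52 = bse l 52 + (if pvIsLet a = true then 1 else 0) := by
        unfold bse
        simp only [mj_cons]
        rw [Finset.sum_add_distrib]
        have h2 : ∑ i ∈ Finset.range 52, (if pvIsLet a = true ∧ lidx a = i then 1 else 0) = (if pvIsLet a = true then 1 else 0) := by
          by_cases hA : pvIsLet a = true
          · obtain ⟨hlt, -, -⟩ := good_facts a (hG a (by simp) hA) hA
            simp only [hA, true_and, if_true]
            rw [Finset.sum_ite_eq (Finset.range 52) (lidx a) (fun _ => 1)]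
            simp [Finset.mem_range.mpr hlt]
          · simp [hA]
        rw [h2]
      rw [hsum, ih hGl, List.filter_cons]
      by_cases hA : pvIsLet a = true <;> simp [hA]

-- ---- the three passes of A ----
theorem pass1_spec (lst : List String) (hG : Good lst) :
    ∀ (cnt : List Int), cnt.length = 52 → ∀ j, j < 52 →
      (lst.foldl csacStep1 cnt).getD j 0 = cnt.getD j 0 + (mj lst j : Int) := by
  induction lst with
  | nil => intro cnt _ j _; simp [mj]
  | cons a l ih =>
      intro cnt hlen j hj
      have hGl : Good l := fun s hs => hG s (List.mem_cons_of_mem _ hs)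
      have hstep_len : (csacStep1 cnt a).length = 52 := by
        unfold csacStep1; split_ifs <;> simp [hlen]
      rw [List.foldl_cons, ih hGl _ hstep_len j hj]
      simp only [mj_cons]
      by_cases hA : pvIsLet a = true
      · obtain ⟨hlt, -, -⟩ := good_facts a (hG a (by simp) hA) hA
        cases hl : pvIsLow a with
        | true =>
            have hidx : (pvOrd a - 97).toNat = lidx a := by simp [lidx, hl]
            simp only [csacStep1, hl, if_true]
            rw [hidx, getD_set]
            by_cases hij : lidx a = j
            · simp [hij, hA, hlen, hj] <;> omega
            · simp [hij, hA]
        | false =>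
            have hup : pvIsUp a = true := by
              have := hA; simp only [pvIsLet, hl, Bool.false_or] at this; exact this
            have hidx : (pvOrd a - 65 + 26).toNat = lidx a := by
              simp [lidx, hl]
            simp only [csacStep1, hl, Bool.false_eq_true, if_false, hup, if_true]
            rw [hidx, getD_set]
            by_cases hij : lidx a = j
            · simp [hij, hA, hlen, hj] <;> omega
            · simp [hij, hA]
      · have hlow : pvIsLow a = false := by
          cases h : pvIsLow a
          · rfl
          · exact absurd (by simp [pvIsLet, h]) hA
        have hup : pvIsUp a = false := by
          cases h : pvIsUp a
          · rfl
          · exact absurd (by simp [pvIsLet, h]) hA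
        simp [csacStep1, hlow, hup, hA]

theorem pass1_len (lst : List String) (cnt : List Int) :
    (lst.foldl csacStep1 cnt).length = cnt.length := by
  refine length_foldl_inv _ _ _ (fun st x => ?_)
  unfold csacStep1; split_ifs <;> simp

theorem pass2_spec (arr : List String) :
    ∀ (d k : Nat), k + d = 52 → 1 ≤ k → ∀ (cnt : List Int), cnt.length = 52 →
      (∀ j, j < 52 → cnt.getD j 0 = if j < k then (bse arr (j + 1) : Int) else (mj arr j : Int)) →
      ∀ j, j < 52 →
        ((PySem.List.pyRange (k : Int) 52 1).foldl csacStep2 cnt).getD j 0 = (bse arr (j + 1) : Int) := by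
  intro d
  induction d with
  | zero =>
      intro k hk h1 cnt hlen hinv j hj
      rw [PySem.List.pyRange_one_eq_nil (by omega)]
      have := hinv j hj
      rw [if_pos (by omega)] at this
      simpa using this
  | succ d ih =>
      intro k hk h1 cnt hlen hinv j hj
      have hk52 : (k : Int) < 52 := by omega
      rw [PySem.List.pyRange_one_cons hk52, List.foldl_cons]
      have hcast : (k : Int) + 1 = ((k + 1 : Nat) : Int) := by push_cast; ring
      rw [hcast]
      have hlen' : (csacStep2 cnt (k : Int)).length = 52 := by simp [csacStep2, hlen]
      refine ih (k + 1) (by omega) (by omega) _ hlen' ?_ j hj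
      intro j' hj'
      unfold csacStep2
      have h1' : ((k : Int)).toNat = k := by omega
      have h2' : ((k : Int) - 1).toNat = k - 1 := by omega
      rw [h1', h2', getD_set]
      by_cases hjk : j' = k
      · subst hjk
        rw [if_pos ⟨rfl, by omega⟩, if_pos (by omega)]
        have ha := hinv j' hj'
        rw [if_neg (by omega)] at ha
        have hb := hinv (j' - 1) (by omega)
        rw [if_pos (by omega)] at hb
        have hsub : j' - 1 + 1 = j' := by omega
        rw [hsub] at hb
        rw [ha, hb, bse_succ]
        push_cast; ring
      · rw [if_neg (by intro hc; exact hjk hc.1.symm)]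
        have := hinv j' hj'
        by_cases hlt : j' < k
        · rw [if_pos hlt] at this; rw [if_pos (by omega)]; exact this
        · rw [if_neg hlt] at this; rw [if_neg (by omega)]; exact this

theorem pass2_len (l : List Int) (cnt : List Int) : (l.foldl csacStep2 cnt).length = cnt.length := by
  refine length_foldl_inv _ _ _ (fun st x => ?_)
  unfold csacStep2; simp

theorem pass3_spec :
    ∀ (lst : List String), Good lst → ∀ (b : Nat → Nat) (cnt : List Int) (out : List String),
      cnt.length = 52 →
      (∀ j, j < 52 → cnt.getD j 0 = (b j : Int) + (mj lst j : Int)) →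
      (∀ j, j < 52 → b j + mj lst j ≤ out.length) →
      (∀ j, j < 52 → ∀ j', j' < 52 → j ≠ j' → b j + mj lst j ≤ b j' ∨ b j' + mj lst j' ≤ b j) →
      ((lst.foldr (fun ch st => csacStep3 st ch) (cnt, out)).1.length = 52 ∧
       (lst.foldr (fun ch st => csacStep3 st ch) (cnt, out)).2.length = out.length ∧
       (∀ j, j < 52 → (lst.foldr (fun ch st => csacStep3 st ch) (cnt, out)).1.getD j 0 = (b j : Int)) ∧
       (∀ p, p < out.length → (lst.foldr (fun ch st => csacStep3 st ch) (cnt, out)).2.getD p "" =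
          match pick (mj lst) b p with
          | some j => lstr j
          | none => out.getD p "")) := by
  intro lst
  induction lst with
  | nil =>
      intro hG b cnt out hlen hc hub hdisj
      refine ⟨hlen, rfl, ?_, ?_⟩
      · intro j hj; have := hc j hj; simpa [mj] using this
      · intro p hp
        have hnone : pick (mj []) b p = none := by
          refine List.find?_eq_none.mpr (fun j _ => ?_)
          simp [mj]
        rw [hnone]
        rfl
  | cons a lst ih =>
      intro hG b cnt out hlen hc hub hdisj
      have hGl : Good lst := fun s hs => hG s (List.mem_cons_of_mem _ hs)
      by_cases hA : pvIsLet a = true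
      case neg =>
        have hlow : pvIsLow a = false := by
          cases h : pvIsLow a
          · rfl
          · exact absurd (by simp [pvIsLet, h]) hA
        have hup : pvIsUp a = false := by
          cases h : pvIsUp a
          · rfl
          · exact absurd (by simp [pvIsLet, h]) hA
        have hmj : mj (a :: lst) = mj lst := by
          funext j; rw [mj_cons]; simp [hA]
        rw [hmj] at hc hub hdisj ⊢
        obtain ⟨L1, L2, L3, L4⟩ := ih hGl b cnt out hlen hc hub hdisj
        simp only [List.foldr_cons, csacStep3, hlow, Bool.false_eq_true, if_false, hup]
        exact ⟨L1, L2, L3, L4⟩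
      case pos =>
        obtain ⟨hja, haeq, -⟩ := good_facts a (hG a (by simp) hA) hA
        have hmj : ∀ j, mj (a :: lst) j = mj lst j + (if j = lidx a then 1 else 0) := by
          intro j; rw [mj_cons]
          by_cases hj' : j = lidx a
          · simp [hj', hA]
          · have hne : ¬ (lidx a = j) := fun h => hj' h.symm
            simp [hj', hA, hne]
        have hc' : ∀ j, j < 52 → cnt.getD j 0 =
            ((b j + (if j = lidx a then 1 else 0) : Nat) : Int) + (mj lst j : Int) := by
          intro j hj; have := hc j hj; rw [hmj j] at this
          by_cases hj' : j = lidx a <;> simp [hj'] at this ⊢ <;> omega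
        have hub' : ∀ j, j < 52 → (b j + (if j = lidx a then 1 else 0)) + mj lst j ≤ out.length := by
          intro j hj; have := hub j hj; rw [hmj j] at this; omega
        have hdisj' : ∀ j, j < 52 → ∀ j', j' < 52 → j ≠ j' →
            (b j + (if j = lidx a then 1 else 0)) + mj lst j ≤ (b j' + (if j' = lidx a then 1 else 0)) ∨
            (b j' + (if j' = lidx a then 1 else 0)) + mj lst j' ≤ (b j + (if j = lidx a then 1 else 0)) := by
          intro j hj j' hj' hne
          have h0 := hdisj j hj j' hj' hne
          rw [hmj j, hmj j'] at h0
          have hne' : ¬ (j = lidx a ∧ j' = lidx a) := fun ⟨u, v⟩ => hne (u.trans v.symm)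
          by_cases u : j = lidx a <;> by_cases v : j' = lidx a <;> simp [u, v] at h0 ⊢ <;> omega
        obtain ⟨L1, L2, L3, L4⟩ := ih hGl (fun j => b j + (if j = lidx a then 1 else 0)) cnt out hlen hc' hub' hdisj'
        set r := List.foldr (fun ch st => csacStep3 st ch) (cnt, out) lst with hr
        have hstep : List.foldr (fun ch st => csacStep3 st ch) (cnt, out) (a :: lst) =
            (r.1.set (lidx a) (r.1.getD (lidx a) 0 - 1),
             r.2.set (r.1.getD (lidx a) 0 - 1).toNat a) := by
          rw [List.foldr_cons, ← hr]
          cases hl : pvIsLow a with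
          | true => simp only [csacStep3, hl, if_true, lidx]
          | false =>
              have hup : pvIsUp a = true := by
                have := hA; simp only [pvIsLet, hl, Bool.false_or] at this; exact this
              simp only [csacStep3, hl, Bool.false_eq_true, if_false, hup, if_true, lidx]
        have hbja : r.1.getD (lidx a) 0 = ((b (lidx a) : Int) + 1) := by
          rw [L3 (lidx a) hja]; simp
        have hm1 : r.1.getD (lidx a) 0 - 1 = (b (lidx a) : Int) := by rw [hbja]; ring
        have hmja1 : 1 ≤ mj (a :: lst) (lidx a) := by rw [hmj (lidx a)]; simp
        have hblt : b (lidx a) < out.length := by have := hub (lidx a) hja; omega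
        have hr2len : r.2.length = out.length := L2
        have hr1len : r.1.length = 52 := L1
        rw [hstep, hm1]
        have htn : ((b (lidx a) : Int)).toNat = b (lidx a) := by omega
        rw [htn]
        refine ⟨by simp [hr1len], by simp [hr2len], ?_, ?_⟩
        · intro j hj
          rw [getD_set]
          by_cases hj' : lidx a = j
          · subst hj'; rw [if_pos ⟨rfl, by omega⟩]
          · rw [if_neg (fun hcon => hj' hcon.1)]
            have hne : ¬ (j = lidx a) := fun h => hj' h.symm
            have := L3 j hj
            simp [hne] at this
            exact this
        · intro p hp
          rw [getD_set]
          by_cases hpb : b (lidx a) = p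
          · rw [if_pos ⟨hpb, by omega⟩]
            have hsome : pick (mj (a :: lst)) b p = some (lidx a) := by
              refine find?_eq_some_of_unique _ _ (lidx a) (List.mem_range.mpr hja) ?_ ?_
              · simp only [Bool.and_eq_true, decide_eq_true_eq]
                omega
              · intro x hx hPx
                simp only [Bool.and_eq_true, decide_eq_true_eq] at hPx
                by_contra hxne
                have := hdisj x (List.mem_range.mp hx) (lidx a) hja hxne
                omega
            rw [hsome]
            exact haeq
          · rw [if_neg (fun hcon => hpb hcon.1)]
            rw [L4 p hp]
            have hpick : pick (mj lst) (fun j => b j + (if j = lidx a then 1 else 0)) p =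
                pick (mj (a :: lst)) b p := by
              unfold pick
              refine (find?_congr' _ _ _ (fun x hx => ?_)).symm
              have hx52 := List.mem_range.mp hx
              rw [← Bool.decide_and, ← Bool.decide_and, decide_eq_decide]
              have := hmj x
              by_cases u : x = lidx a <;> simp [u] at this ⊢ <;> omega
            rw [← hpick]

-- ---- the canonical result ----
theorem pick_eq_some (lst : List String) (p j : Nat) (hj : j < 52)
    (h1 : bse lst j ≤ p) (h2 : p < bse lst (j + 1)) :
    pick (fun i => mj lst i) (fun i => bse lst i) p = some j := by
  refine find?_eq_some_of_unique _ _ j (List.mem_range.mpr hj) ?_ ?_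
  · simp only [Bool.and_eq_true, decide_eq_true_eq]
    have := bse_succ lst j; omega
  · intro x hx hPx
    simp only [Bool.and_eq_true, decide_eq_true_eq] at hPx
    have hbx := bse_succ lst x
    have hbj := bse_succ lst j
    by_contra hne
    rcases Nat.lt_or_ge x j with h | h
    · have := bse_mono lst (show x + 1 ≤ j by omega); omega
    · have := bse_mono lst (show j + 1 ≤ x by omega); omega

theorem pick_eq_none (lst : List String) (p : Nat) (h : bse lst 52 ≤ p) :
    pick (fun i => mj lst i) (fun i => bse lst i) p = none := by
  refine List.find?_eq_none.mpr (fun x hx => ?_)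
  simp only [Bool.and_eq_true, decide_eq_true_eq, not_and, not_lt]
  intro h1
  have h2 := bse_succ lst x
  have h3 := bse_mono lst (show x + 1 ≤ 52 from List.mem_range.mp hx)
  omega

theorem canonN_spec (lst : List String) :
    ∀ n, n ≤ 52 → (canonN lst n).length = bse lst n ∧
      (∀ p, p < bse lst n → ∃ j, j < n ∧ bse lst j ≤ p ∧ p < bse lst (j + 1) ∧
        (canonN lst n).getD p "" = lstr j) := by
  intro n
  induction n with
  | zero => intro _; exact ⟨by simp [canonN, bse], fun p hp => absurd hp (by simp [bse])⟩
  | succ n ih =>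
      intro hn
      obtain ⟨hlenn, hptw⟩ := ih (by omega)
      have hsplit : canonN lst (n + 1) = canonN lst n ++ List.replicate (mj lst n) (lstr n) := by
        simp [canonN, List.range_succ]
      have hlen1 : (canonN lst (n + 1)).length = bse lst (n + 1) := by
        rw [hsplit]; simp [hlenn, bse_succ]
      refine ⟨hlen1, fun p hp => ?_⟩
      by_cases hlt : p < bse lst n
      · obtain ⟨j, hj, h1, h2, h3⟩ := hptw p hlt
        refine ⟨j, by omega, h1, h2, ?_⟩
        rw [hsplit, List.getD_eq_getElem?_getD, List.getElem?_append_left (by omega : p < (canonN lst n).length),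
          ← List.getD_eq_getElem?_getD, h3]
      · refine ⟨n, by omega, by omega, by omega, ?_⟩
        rw [hsplit, List.getD_eq_getElem?_getD,
          List.getElem?_append_right (by omega : (canonN lst n).length ≤ p)]
        have hrep : p - (canonN lst n).length < mj lst n := by
          have := bse_succ lst n; omega
        simp [List.getElem?_replicate, hrep]

-- ---- B's sort equals the canonical result ----
theorem flatMap_perm_cons (x : String) (ja : Nat) (f g : Nat → List String) :
    ∀ (l : List Nat), l.Nodup → ja ∈ l → (∀ j ∈ l, j ≠ ja → f j = g j) →
      f ja = x :: g ja → (l.flatMap f).Perm (x :: l.flatMap g) := by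
  intro l
  induction l with
  | nil => intro _ h; cases h
  | cons h t iht =>
      intro hnd hmem hfg hja
      rcases List.nodup_cons.mp hnd with ⟨hht, hndt⟩
      by_cases hh : h = ja
      · subst hh
        have hcongr : t.flatMap f = t.flatMap g :=
          List.flatMap_congr (fun j hj => hfg j (by simp [hj]) (fun he => hht (he ▸ hj)))
        rw [List.flatMap_cons, List.flatMap_cons, hja, hcongr]
        exact List.Perm.refl _
      · have hmem' : ja ∈ t := by
          cases hmem with
          | head => exact absurd rfl hh
          | tail _ h' => exact h'
        have hfh : f h = g h := hfg h (by simp) hh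
        rw [List.flatMap_cons, List.flatMap_cons, hfh]
        have hp1 : (g h ++ t.flatMap f).Perm (g h ++ (x :: t.flatMap g)) :=
          List.Perm.append_left _ (iht hndt hmem' (fun j hj hne => hfg j (by simp [hj]) hne) hja)
        exact hp1.trans List.perm_middle

theorem perm_canon_letters (lst : List String) (hG : Good lst) :
    (canon lst).Perm (lst.filter pvIsLet) := by
  induction lst with
  | nil =>
      have hm : ∀ j, mj ([] : List String) j = 0 := by intro j; simp [mj]
      simp [canon, canonN, hm]
  | cons a l ih =>
      have hGl : Good l := fun s hs => hG s (List.mem_cons_of_mem _ hs)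
      by_cases hA : pvIsLet a = true
      · obtain ⟨hja, haeq, -⟩ := good_facts a (hG a (by simp) hA) hA
        have hmj : ∀ j, mj (a :: l) j = mj l j + (if j = lidx a then 1 else 0) := by
          intro j; rw [mj_cons]
          by_cases hj' : j = lidx a
          · simp [hj', hA]
          · have hne : ¬ (lidx a = j) := fun h => hj' h.symm
            simp [hj', hA, hne]
        have hperm : (canon (a :: l)).Perm (a :: canon l) := by
          refine flatMap_perm_cons a (lidx a)
            (fun j => List.replicate (mj (a :: l) j) (lstr j))
            (fun j => List.replicate (mj l j) (lstr j))
            (List.range 52) List.nodup_range (List.mem_range.mpr hja) ?_ ?_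
          · intro j _ hne
            simp only [hmj j, if_neg hne, Nat.add_zero]
          · show List.replicate (mj (a :: l) (lidx a)) (lstr (lidx a)) =
                a :: List.replicate (mj l (lidx a)) (lstr (lidx a))
            rw [hmj (lidx a)]
            simp only [if_pos, List.replicate_succ]
            rw [← haeq]
        rw [List.filter_cons_of_pos hA]
        exact hperm.trans ((ih hGl).cons a)
      · have hmj : mj (a :: l) = mj l := by funext j; rw [mj_cons]; simp [hA]
        rw [List.filter_cons_of_neg (by simp [hA])]
        have hcan : canon (a :: l) = canon l := by simp [canon, canonN, hmj]
        rw [hcan]; exact ih hGl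

theorem rank_lstr (j : Nat) (hj : j < 52) : csacRank (lstr j) = (j : Int) := by
  obtain ⟨h1, h2, h3⟩ := lstr_facts j hj
  obtain ⟨-, -, h4⟩ := good_facts _ h2 h1
  rw [h4, h3]

theorem canonN_pairwise (lst : List String) :
    ∀ n, n ≤ 52 → (canonN lst n).Pairwise (fun s t => csacRank s ≤ csacRank t) := by
  intro n
  induction n with
  | zero => intro _; simp [canonN]
  | succ n ih =>
      intro hn
      have hsplit : canonN lst (n + 1) = canonN lst n ++ List.replicate (mj lst n) (lstr n) := by
        simp [canonN, List.range_succ]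
      rw [hsplit, List.pairwise_append]
      refine ⟨ih (by omega), ?_, ?_⟩
      · rw [List.pairwise_replicate]
        right; exact le_refl _
      · intro x hx y hy
        have hxm : ∃ j, j < n ∧ x = lstr j := by
          simp only [canonN, List.mem_flatMap, List.mem_range, List.mem_replicate] at hx
          obtain ⟨j, hj, -, hx⟩ := hx
          exact ⟨j, hj, hx⟩
        obtain ⟨j, hj, hxe⟩ := hxm
        have hye : y = lstr n := (List.eq_of_mem_replicate hy)
        rw [hxe, hye, rank_lstr j (by omega), rank_lstr n (by omega)]
        exact_mod_cast Nat.le_of_lt hj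

theorem pairwise_canon (lst : List String) :
    (canon lst).Pairwise (fun s t => csacRank s ≤ csacRank t) := by
  exact canonN_pairwise lst 52 (le_refl _)

theorem sorted_unique (l₁ : List String) :
    ∀ (l₂ : List String) (key : String → Int), l₁.Perm l₂ →
      l₁.Pairwise (fun s t => key s ≤ key t) → l₂.Pairwise (fun s t => key s ≤ key t) →
      (∀ x ∈ l₁, ∀ y ∈ l₁, key x = key y → x = y) → l₁ = l₂ := by
  induction l₁ with
  | nil =>
      intro l₂ key hperm _ _ _
      have := hperm.length_eq
      simp at this
      exact (List.length_eq_zero_iff.mp this.symm).symm ▸ rfl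
  | cons a t ih =>
      intro l₂ key hperm hp1 hp2 hinj
      cases l₂ with
      | nil => exact absurd hperm.length_eq (by simp)
      | cons b t₂ =>
          have hamem : a ∈ b :: t₂ := hperm.mem_iff.mp (by simp)
          have hbmem : b ∈ a :: t := hperm.mem_iff.mpr (by simp)
          rw [List.mem_cons] at hamem hbmem
          have hab : key a = key b := by
            have h1 : key a ≤ key b := by
              rcases hbmem with h | h
              · simp [h]
              · exact (List.pairwise_cons.mp hp1).1 b h
            have h2 : key b ≤ key a := by
              rcases hamem with h | h
              · simp [h]
              · exact (List.pairwise_cons.mp hp2).1 a h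
            exact le_antisymm h1 h2
          have hae : a = b := hinj a (by simp) b (by
            rcases hbmem with h | h
            · simp [h]
            · simp [h]) hab
          subst hae
          have htperm : t.Perm t₂ := hperm.cons_inv
          have := ih t₂ key htperm (List.pairwise_cons.mp hp1).2 (List.pairwise_cons.mp hp2).2
            (fun x hx y hy h => hinj x (by simp [hx]) y (by simp [hy]) h)
          rw [this]

-- ---- join ----
theorem join_empty_append_replicate (l : List String) (k : Nat) :
    PySem.Str.join "" (l ++ List.replicate k "") = PySem.Str.join "" l := by
  have chars_join_empty : ∀ (ls : List (List Char)), PySem.Chars.join [] ls = ls.flatten := by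
    intro ls
    induction ls with
    | nil => exact PySem.Chars.join_nil []
    | cons a t ih =>
        cases t with
        | nil => simp [PySem.Chars.join_singleton]
        | cons b t' =>
            rw [PySem.Chars.join_cons_cons, ih]
            simp
  have hsep : ("" : String).toList = ([] : List Char) := rfl
  have h1 : (PySem.Str.join "" (l ++ List.replicate k "")).toList = (PySem.Str.join "" l).toList := by
    rw [PySem.Str.toList_join, PySem.Str.toList_join, hsep, chars_join_empty, chars_join_empty]
    simp [List.map_replicate, hsep]
  have := congrArg String.ofList h1
  rwa [String.ofList_toList, String.ofList_toList] at this

-- ---- assembly ----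
theorem A_eq_canon (arr : List String) (hG : Good arr) :
    counting_sort_alphabet_case arr =
      PySem.Str.join "" (canon arr ++ List.replicate (arr.length - bse arr 52) "") := by
  have hdef : counting_sort_alphabet_case arr = PySem.Str.join ""
      ((arr.reverse.foldl csacStep3
        ((PySem.List.pyRange 1 52 1).foldl csacStep2 (arr.foldl csacStep1 (List.replicate 52 0)),
         List.replicate arr.length "")).2) := rfl
  rw [hdef]
  have hcnt0len : (List.replicate 52 (0 : Int)).length = 52 := by simp
  have h1 := pass1_spec arr hG (List.replicate 52 0) hcnt0len
  have h1len : (arr.foldl csacStep1 (List.replicate 52 0)).length = 52 := by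
    rw [pass1_len]; simp
  have h1' : ∀ j, j < 52 → (arr.foldl csacStep1 (List.replicate 52 0)).getD j 0 =
      if j < 1 then (bse arr (j + 1) : Int) else (mj arr j : Int) := by
    intro j hj
    have hrep : (List.replicate 52 (0 : Int)).getD j 0 = 0 := List.getD_replicate _ (by omega)
    rw [h1 j hj, hrep]
    by_cases hj0 : j < 1
    · have hj00 : j = 0 := by omega
      subst hj00
      simp [bse]
    · simp [hj0]
  have h2 := pass2_spec arr 51 1 rfl (le_refl 1) _ h1len h1'
  simp only [Nat.cast_one] at h2
  have h2len : ((PySem.List.pyRange 1 52 1).foldl csacStep2 (arr.foldl csacStep1 (List.replicate 52 0))).length = 52 := by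
    rw [pass2_len]; exact h1len
  have hc : ∀ j, j < 52 →
      ((PySem.List.pyRange 1 52 1).foldl csacStep2 (arr.foldl csacStep1 (List.replicate 52 0))).getD j 0 =
        ((bse arr j : Nat) : Int) + (mj arr j : Int) := by
    intro j hj
    rw [h2 j hj, bse_succ]
    push_cast; ring
  have hL := bse52_eq arr hG
  have hLlen : bse arr 52 ≤ arr.length := by
    rw [hL]; exact List.length_filter_le _ _
  have hub : ∀ j, j < 52 → bse arr j + mj arr j ≤ (List.replicate arr.length ("" : String)).length := by
    intro j hj
    have hs := bse_succ arr j
    have hm := bse_mono arr (show j + 1 ≤ 52 by omega)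
    simp only [List.length_replicate]
    omega
  have hdisj : ∀ j, j < 52 → ∀ j', j' < 52 → j ≠ j' →
      bse arr j + mj arr j ≤ bse arr j' ∨ bse arr j' + mj arr j' ≤ bse arr j := by
    intro j hj j' hj' hne
    rcases lt_or_gt_of_ne hne with h | h
    · left; have := bse_succ arr j; have := bse_mono arr (show j + 1 ≤ j' by omega); omega
    · right; have := bse_succ arr j'; have := bse_mono arr (show j' + 1 ≤ j by omega); omega
  obtain ⟨R1, R2, R3, R4⟩ := pass3_spec arr hG (fun j => bse arr j)
    ((PySem.List.pyRange 1 52 1).foldl csacStep2 (arr.foldl csacStep1 (List.replicate 52 0)))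
    (List.replicate arr.length "") h2len hc hub hdisj
  rw [List.foldl_reverse]
  have hclen := (canonN_spec arr 52 (le_refl _)).1
  have hcgetD := (canonN_spec arr 52 (le_refl _)).2
  have heq : (arr.foldr (fun ch st => csacStep3 st ch)
      ((PySem.List.pyRange 1 52 1).foldl csacStep2 (arr.foldl csacStep1 (List.replicate 52 0)),
       List.replicate arr.length "")).2 =
      canon arr ++ List.replicate (arr.length - bse arr 52) "" := by
    apply List.ext_getElem
    · rw [R2]
      simp only [List.length_replicate, List.length_append]
      unfold canon
      rw [hclen]
      omega
    · intro p hp1 hp2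
      have hplen : p < arr.length := by
        rw [R2] at hp1; simpa using hp1
      have hclen' : (canon arr).length = bse arr 52 := hclen
      rw [← List.getD_eq_getElem _ "" hp1, ← List.getD_eq_getElem _ "" hp2]
      rw [R4 p (by simpa using hplen)]
      by_cases hpL : p < bse arr 52
      · obtain ⟨j, hj, hb1, hb2, hvl⟩ := hcgetD p hpL
        rw [pick_eq_some arr p j hj hb1 hb2]
        show lstr j = _
        conv_rhs => rw [List.getD_eq_getElem?_getD,
          List.getElem?_append_left (show p < (canon arr).length by rw [hclen']; omega)]
        rw [← List.getD_eq_getElem?_getD]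
        exact hvl.symm
      · rw [pick_eq_none arr p (by omega)]
        show (List.replicate arr.length ("" : String)).getD p "" = _
        conv_rhs => rw [List.getD_eq_getElem?_getD,
          List.getElem?_append_right (show (canon arr).length ≤ p by rw [hclen']; omega)]
        rw [← List.getD_eq_getElem?_getD]
        rw [List.getD_replicate _ (show p - (canon arr).length < arr.length - bse arr 52 by rw [hclen']; omega),
            List.getD_replicate _ (show p < arr.length from hplen)]
  rw [heq]

theorem B_eq_canon (arr : List String) (hG : Good arr) :
    counting_sort_alphabet_case_alt arr = PySem.Str.join "" (canon arr) := by
  have hdef : counting_sort_alphabet_case_alt arr =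
      PySem.Str.join "" (PySem.List.sorted (arr.filter pvIsLet) csacRank false) := rfl
  rw [hdef]
  congr 1
  refine sorted_unique _ _ csacRank ?_ ?_ ?_ ?_
  · exact (PySem.List.sorted_perm _ _ _).trans (perm_canon_letters arr hG).symm
  · exact PySem.List.sorted_pairwise _ _
  · exact pairwise_canon arr
  · intro x hx y hy hxy
    have hx' : x ∈ arr.filter pvIsLet := ((PySem.List.sorted_perm _ _ _).mem_iff).mp hx
    have hy' : y ∈ arr.filter pvIsLet := ((PySem.List.sorted_perm _ _ _).mem_iff).mp hy
    rw [List.mem_filter] at hx' hy'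
    obtain ⟨hjx, hex, hrx⟩ := good_facts x (hG x hx'.1 hx'.2) hx'.2
    obtain ⟨hjy, hey, hry⟩ := good_facts y (hG y hy'.1 hy'.2) hy'.2
    rw [hrx, hry] at hxy
    have : lidx x = lidx y := by exact_mod_cast hxy
    rw [hex, hey, this]

-- ===== VERDICT (by name: the statement is the Claim_ definition above) =====
theorem counting_sort_alphabet_case_spec : Claim_equal_counting_sort_alphabet_case := by
  intro arr _ hPre
  unfold Spec_counting_sort_alphabet_case
  have hG : Good arr := hPre
  rw [A_eq_canon arr hG, B_eq_canon arr hG, join_empty_append_replicate]
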